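-- pv_equiv track=rewrite | github.com/simonporter65/Local-Pi-Assistant | routes/chat.py | _needed_ctx
-- ===== SOURCE A (Python) =====
-- def _needed_ctx(system: str, messages: list, budget: int) -> int:
--     """Estimate num_ctx needed and snap to a power-of-2 level.
--
--     Smaller num_ctx = smaller KV cache = faster prefill + less RAM.
--     We cap at 8192 to avoid requesting more than any model supports.
--     """
--     total_chars = len(system) + sum(len(m.get("content", "")) for m in messages)
--     input_tokens = total_chars // 4 + 64
--     needed = min(input_tokens + budget, 8192)
--     for level in (1024, 2048, 4096, 8192):
--         if needed <= level:
--             return level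
--     return 8192
-- ===== SOURCE B (Python) =====
-- def _needed_ctx(system: str, messages: list, budget: int) -> int:
--     """Closed-form power-of-2 snap instead of scanning the level tuple."""
--     total_chars = len(system) + sum(len(m.get("content", "")) for m in messages)
--     input_tokens = total_chars // 4 + 64
--     needed = min(input_tokens + budget, 8192)
--     n = max(needed, 1)
--     exp = max(10, min(13, (n - 1).bit_length()))
--     return 1 << exp
-- ===== Notes on version B (the rewrite author's own statement) =====
-- stated objective: alternative
-- what changed: The four-iteration snapping loop over the level tuple is replaced by a closed-form bit_length computation: exp = max(10, min(13, (max(needed,1)-1).bit_length())) and return 1 << exp.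
import Mathlib
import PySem

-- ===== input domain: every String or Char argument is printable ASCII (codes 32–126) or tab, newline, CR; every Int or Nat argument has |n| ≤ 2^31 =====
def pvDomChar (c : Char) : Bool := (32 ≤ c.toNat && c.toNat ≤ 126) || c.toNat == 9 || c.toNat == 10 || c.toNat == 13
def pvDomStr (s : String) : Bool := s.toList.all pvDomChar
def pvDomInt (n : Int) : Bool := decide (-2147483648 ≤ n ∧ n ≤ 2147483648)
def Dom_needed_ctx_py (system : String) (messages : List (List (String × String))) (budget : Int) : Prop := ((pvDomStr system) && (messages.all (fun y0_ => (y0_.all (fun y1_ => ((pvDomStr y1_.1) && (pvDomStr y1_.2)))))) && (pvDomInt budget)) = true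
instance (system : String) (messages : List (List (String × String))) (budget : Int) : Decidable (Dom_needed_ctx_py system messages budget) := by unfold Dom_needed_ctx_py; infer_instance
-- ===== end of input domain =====

-- B replaces A's four-iteration snapping loop by a closed-form bit_length power-of-2 computation (objective: alternative, same cost).

-- ===== PORT A =====
-- the 'for level in (1024, 2048, 4096, 8192): if needed <= level: return level' loop
def pvSnapLoop (needed : Int) : List Int → Int
  | [] => 8192
  | l :: ls => if needed ≤ l then l else pvSnapLoop needed ls

def needed_ctx_py (system : String) (messages : List (List (String × String))) (budget : Int) : Int :=
  let total_chars : Int :=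
    PySem.Str.len system +
      messages.foldl (fun acc m => acc + PySem.Str.len (PySem.Dict.getD (PySem.Dict.ofList m) "content" "")) 0
  let input_tokens : Int := PySem.Int.floordiv total_chars 4 + 64
  let needed : Int := min (input_tokens + budget) 8192
  pvSnapLoop needed [1024, 2048, 4096, 8192]

-- ===== PORT B =====
-- Python's int.bit_length for a non-negative argument (exact there: bit_length(0)=0, else ⌊log2 m⌋+1)
def pvBitLength (m : Int) : Int := if m ≤ 0 then 0 else (Nat.log2 m.toNat : Int) + 1

def needed_ctx_py_alt (system : String) (messages : List (List (String × String))) (budget : Int) : Int :=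
  let total_chars : Int :=
    PySem.Str.len system +
      messages.foldl (fun acc m => acc + PySem.Str.len (PySem.Dict.getD (PySem.Dict.ofList m) "content" "")) 0
  let input_tokens : Int := PySem.Int.floordiv total_chars 4 + 64
  let needed : Int := min (input_tokens + budget) 8192
  let n : Int := max needed 1
  let exp : Int := max 10 (min 13 (pvBitLength (n - 1)))
  -- 1 << exp; exp is always in [10,13] so the toNat cast is exact
  (2 : Int) ^ exp.toNat

-- ===== PRECONDITION & SPEC =====
def Spec_needed_ctx_py (system : String) (messages : List (List (String × String))) (budget : Int) (out : Int) : Prop := out = needed_ctx_py_alt system messages budget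
instance (system : String) (messages : List (List (String × String))) (budget : Int) (out : Int) : Decidable (Spec_needed_ctx_py system messages budget out) := by unfold Spec_needed_ctx_py; infer_instance

-- ===== CLAIM (what is proved, stated in full; the proofs are below) =====
def Claim_equal_needed_ctx_py : Prop := ∀ (system : String) (messages : List (List (String × String))) (budget : Int), Dom_needed_ctx_py system messages budget → Spec_needed_ctx_py system messages budget (needed_ctx_py system messages budget)

-- ===== LEMMAS AND PROOFS =====

theorem log2_eq_of_bounds {k e : ℕ} (h1 : 2 ^ e ≤ k) (h2 : k < 2 ^ (e + 1)) : Nat.log2 k = e := by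
  have hk : k ≠ 0 := by have := Nat.two_pow_pos e; omega
  have hle : e ≤ Nat.log2 k := (Nat.le_log2 hk).mpr h1
  have hlt : Nat.log2 k < e + 1 := (Nat.log2_lt hk).mpr h2
  omega

theorem snap_eq_closed (needed : Int) (h : needed ≤ 8192) :
    pvSnapLoop needed [1024, 2048, 4096, 8192] =
      (2 : Int) ^ (max 10 (min 13 (pvBitLength (max needed 1 - 1)))).toNat := by
  by_cases h1 : needed ≤ 1024
  · have hbl : pvBitLength (max needed 1 - 1) ≤ 10 := by
      unfold pvBitLength
      split_ifs with hz
      · omega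
      · have hlog : Nat.log2 (max needed 1 - 1).toNat < 10 := by
          apply (Nat.log2_lt (by omega)).mpr; omega
        omega
    simp only [pvSnapLoop, if_pos h1]
    have : (max 10 (min 13 (pvBitLength (max needed 1 - 1)))).toNat = 10 := by omega
    rw [this]; norm_num
  · have hm : max needed 1 - 1 = needed - 1 := by omega
    have hpos : ¬ (needed - 1 ≤ 0) := by omega
    by_cases h2 : needed ≤ 2048
    · have hlog : Nat.log2 (needed - 1).toNat = 10 :=
        log2_eq_of_bounds (by omega) (by omega)
      have : (max 10 (min 13 (pvBitLength (max needed 1 - 1)))).toNat = 11 := by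
        unfold pvBitLength; rw [hm, if_neg hpos, hlog]; omega
      rw [this]
      simp only [pvSnapLoop, if_neg h1, if_pos h2]; norm_num
    · by_cases h3 : needed ≤ 4096
      · have hlog : Nat.log2 (needed - 1).toNat = 11 :=
          log2_eq_of_bounds (by omega) (by omega)
        have : (max 10 (min 13 (pvBitLength (max needed 1 - 1)))).toNat = 12 := by
          unfold pvBitLength; rw [hm, if_neg hpos, hlog]; omega
        rw [this]
        simp only [pvSnapLoop, if_neg h1, if_neg h2, if_pos h3]; norm_num
      · have hlog : Nat.log2 (needed - 1).toNat = 12 :=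
          log2_eq_of_bounds (by omega) (by omega)
        have : (max 10 (min 13 (pvBitLength (max needed 1 - 1)))).toNat = 13 := by
          unfold pvBitLength; rw [hm, if_neg hpos, hlog]; omega
        rw [this]
        have h4 : needed ≤ 8192 := h
        simp only [pvSnapLoop, if_neg h1, if_neg h2, if_neg h3, if_pos h4]; norm_num

-- ===== VERDICT (by name: the statement is the Claim_ definition above) =====
theorem needed_ctx_py_spec : Claim_equal_needed_ctx_py := by
  intro system messages budget _
  unfold Spec_needed_ctx_py needed_ctx_py needed_ctx_py_alt
  simp only []
  exact snap_eq_closed _ (min_le_right _ _)
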